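-- pv_equiv track=rewrite | github.com/Divisekara/CS-academy-algorithms | 23.RECURSION odd divisors.py | f
-- ===== SOURCE A (Python) =====
-- def f(n):
--     if(n==0):
--         return 0
--     total = 0
--
--     k = (n+1)//2
--
--     total += k**2
--
--     total += f(n//2)
--
--     return total
-- ===== SOURCE B (Python) =====
-- def f(n):
--     total = 0
--     for k in range(n.bit_length()):
--         m = n >> k
--         total += ((m + 1) >> 1) ** 2
--     return total
-- ===== Notes on version B (the rewrite author's own statement) =====
-- stated objective: alternative
-- what changed: Replaces the recursion on n//2 with a bounded for-loop over bit positions k in range(n.bit_length()), summing ((n >> k) + 1 >> 1)**2 with shifts instead of recursive floor divisions.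
import Mathlib
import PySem

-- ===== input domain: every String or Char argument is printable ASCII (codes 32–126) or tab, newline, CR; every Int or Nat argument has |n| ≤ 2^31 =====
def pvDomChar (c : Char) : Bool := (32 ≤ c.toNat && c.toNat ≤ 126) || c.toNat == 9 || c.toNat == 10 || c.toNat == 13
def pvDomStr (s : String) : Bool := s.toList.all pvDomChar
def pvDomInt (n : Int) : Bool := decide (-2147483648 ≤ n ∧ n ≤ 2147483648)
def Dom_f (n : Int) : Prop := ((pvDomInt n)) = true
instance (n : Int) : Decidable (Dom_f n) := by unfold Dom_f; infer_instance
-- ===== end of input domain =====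

-- B replaces A's recursion by a bounded for-loop over bit positions: it sums
-- ((n >> k) + 1 >> 1)^2 for k in range(n.bit_length()), instead of recursing on n//2.
-- Pre_f restricts to 0 ≤ n: for negative n, A's recursion never reaches its base case (RecursionError).


-- ===== PORT A =====
-- literal port of A's recursion; the 'n < 0' guard only makes the recursion total in Lean —
-- Python raises RecursionError there, and Pre_f excludes those inputs
def f (n : Int) : Int :=
  if n == 0 then 0
  else if n < 0 then 0
  else (PySem.Int.floordiv (n + 1) 2) ^ 2 + f (PySem.Int.floordiv n 2)
termination_by n.toNat
decreasing_by
  simp only [beq_iff_eq] at *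
  have := PySem.Int.floordiv_eq_ediv_of_pos (a := n) (b := 2) (by omega)
  omega

-- ===== PORT B =====
-- Source B's for-loop over range(n.bit_length()); Python's n.bit_length() is Nat.size of |n|,
-- and Python's arithmetic right shift m >> k (k ≥ 0) is exactly floor division by 2^k
def f_alt (n : Int) : Int :=
  (PySem.List.pyRange 0 (n.natAbs.size : Int) 1).foldl
    (fun total k =>
      total + (PySem.Int.floordiv (PySem.Int.floordiv n (2 ^ k.toNat) + 1) 2) ^ 2) 0

-- ===== PRECONDITION & SPEC =====
-- Pre_f excludes n < 0, on which Python A raises RecursionError (the recursion never terminates)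
def Pre_f (n : Int) : Prop := 0 ≤ n
instance (n : Int) : Decidable (Pre_f n) := by unfold Pre_f; infer_instance
def pvWitness_f : Int := 10

def Spec_f (n : Int) (out : Int) : Prop := out = f_alt n
instance (n : Int) (out : Int) : Decidable (Spec_f n out) := by unfold Spec_f; infer_instance

-- ===== CLAIM (what is proved, stated in full; the proofs are below) =====
def Claim_equal_f : Prop := ∀ (n : Int), Dom_f n → Pre_f n → Spec_f n (f n)

-- ===== LEMMAS AND PROOFS =====

-- the k-th summand of B's loop
def pvTerm (n : Int) (k : Nat) : Int :=
  (PySem.Int.floordiv (PySem.Int.floordiv n (2 ^ k) + 1) 2) ^ 2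

theorem pvFd_cast (m d : Nat) (hd : 0 < d) :
    PySem.Int.floordiv (m : Int) (d : Int) = ((m / d : Nat) : Int) := by
  rw [PySem.Int.floordiv_eq_ediv_of_pos (by exact_mod_cast hd)]
  exact (Int.natCast_ediv m d).symm

theorem pvTerm_cast (m k : Nat) :
    pvTerm (m : Int) k = (((m / 2 ^ k + 1) / 2 : Nat) : Int) ^ 2 := by
  unfold pvTerm
  have e1 : PySem.Int.floordiv (m : Int) ((2 : Int) ^ k) = ((m / 2 ^ k : Nat) : Int) := by
    rw [show ((2 : Int) ^ k) = ((2 ^ k : Nat) : Int) by push_cast; ring]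
    exact pvFd_cast m (2 ^ k) (by positivity)
  rw [e1, show ((m / 2 ^ k : Nat) : Int) + 1 = ((m / 2 ^ k + 1 : Nat) : Int) by push_cast; ring,
      show (2 : Int) = ((2 : Nat) : Int) by norm_num,
      pvFd_cast (m / 2 ^ k + 1) 2 (by norm_num)]

theorem pvTerm_succ (n : Int) (h : 0 ≤ n) (k : Nat) :
    pvTerm n (k + 1) = pvTerm (PySem.Int.floordiv n 2) k := by
  obtain ⟨m, rfl⟩ := Int.eq_ofNat_of_zero_le h
  rw [show PySem.Int.floordiv (m : Int) 2 = ((m / 2 : Nat) : Int) by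
        rw [show (2 : Int) = ((2 : Nat) : Int) by norm_num]; exact pvFd_cast m 2 (by norm_num),
      pvTerm_cast, pvTerm_cast, Nat.div_div_eq_div_mul, ← pow_succ']

theorem pvTerm_zero_n (k : Nat) : pvTerm 0 k = 0 := by
  unfold pvTerm
  have : PySem.Int.floordiv 0 (2 ^ k) = 0 := by
    rw [PySem.Int.floordiv_eq_ediv_of_pos (by positivity)]; simp
  rw [this]
  decide

-- B's sum over any s with n < 2^s equals A's recursion (terms beyond bit_length are 0)
theorem pvSum_eq_f : ∀ (s : Nat) (n : Int), 0 ≤ n → n < 2 ^ s →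
    ((List.range s).map (pvTerm n)).sum = f n := by
  intro s
  induction s with
  | zero =>
    intro n h0 hlt
    norm_num at hlt
    have hz : n = 0 := by omega
    subst hz; rw [f]; simp
  | succ s ih =>
    intro n h0 hlt
    by_cases hz : n = 0
    · subst hz
      rw [f,
          List.map_congr_left (g := fun _ => (0 : Int)) (fun k _ => pvTerm_zero_n k)]
      simp
    · have hpos : 0 < n := lt_of_le_of_ne h0 (Ne.symm hz)
      have hfd : PySem.Int.floordiv n 2 = n / 2 :=
        PySem.Int.floordiv_eq_ediv_of_pos (by norm_num)
      have hp : (2 : Int) ^ (s + 1) = 2 * 2 ^ s := by ring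
      rw [List.range_succ_eq_map, List.map_cons, List.sum_cons, List.map_map]
      have hmap : (pvTerm n ∘ Nat.succ) = pvTerm (PySem.Int.floordiv n 2) := by
        funext k
        exact pvTerm_succ n h0 k
      rw [hmap, ih _ (by rw [hfd]; omega) (by rw [hfd]; rw [hp] at hlt; omega)]
      conv_rhs => rw [f]
      simp only [beq_iff_eq]
      rw [if_neg hz, if_neg (not_lt.mpr h0)]
      have h0' : pvTerm n 0 = (PySem.Int.floordiv (n + 1) 2) ^ 2 := by
        unfold pvTerm
        norm_num
      rw [h0']

theorem pvFoldl_add_sum (l : List Nat) (g : Nat → Int) :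
    ∀ t : Int, l.foldl (fun acc k => acc + g k) t = t + (l.map g).sum := by
  induction l with
  | nil => intro t; simp
  | cons a l ih =>
    intro t
    rw [List.foldl_cons, ih, List.map_cons, List.sum_cons]
    ring

theorem f_alt_eq_sum (n : Int) :
    f_alt n = ((List.range n.natAbs.size).map (pvTerm n)).sum := by
  unfold f_alt
  rw [PySem.List.pyRange_zero_nat, List.foldl_map, pvFoldl_add_sum, zero_add]
  refine congrArg List.sum (List.map_congr_left fun k _ => ?_)
  simp [pvTerm]

-- ===== VERDICT (by name: the statement is the Claim_ definition above) =====
theorem f_spec : Claim_equal_f := by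
  intro n _ hpre
  unfold Spec_f
  rw [f_alt_eq_sum]
  have hlt : n < 2 ^ (n.natAbs.size) := by
    have h1 : n.natAbs < 2 ^ n.natAbs.size := Nat.lt_size_self _
    have h2 : (n.natAbs : Int) = n := Int.natAbs_of_nonneg hpre
    calc n = (n.natAbs : Int) := h2.symm
      _ < ((2 ^ n.natAbs.size : Nat) : Int) := by exact_mod_cast h1
      _ = 2 ^ n.natAbs.size := by push_cast; ring
  exact (pvSum_eq_f _ n hpre hlt).symm
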